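-- pv_equiv track=rewrite | github.com/MediaBrain-SJTU/FreeAlign | freealign/models/superbevglue.py | modify_match_pair
-- ===== SOURCE A (Python) =====
-- def modify_match_pair(match_pair, N, M):
--     agent0_list = []
--     agent1_list = []
--     for pair in match_pair:
--         agent0_list.append(pair[0])
--         agent1_list.append(pair[1])
--     for i in range(N):
--         if i not in agent0_list:
--             match_pair.append((i, -1))
--     for i in range(M):
--         if i not in agent1_list:
--             match_pair.append((-1, i))
--     return match_pair
-- ===== SOURCE B (Python) =====
-- def modify_match_pair(match_pair, N, M):
--     # Sort the distinct in-range matched indices and emit the gaps between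
--     # consecutive matched values -- no per-index membership test at all.
--     def gaps(values, limit):
--         out = []
--         cur = 0
--         for v in sorted({x for x in values if 0 <= x < limit}):
--             out.extend(range(cur, v))
--             cur = v + 1
--         out.extend(range(cur, limit))
--         return out
--     unmatched0 = gaps([p[0] for p in match_pair], N)
--     unmatched1 = gaps([p[1] for p in match_pair], M)
--     match_pair.extend((i, -1) for i in unmatched0)
--     match_pair.extend((-1, i) for i in unmatched1)
--     return match_pair
-- ===== Notes on version B (the rewrite author's own statement) =====
-- stated objective: alternative
-- what changed: Replaces A's per-index linear membership scans over range(N)/range(M) by sorting the distinct in-range matched indices once and emitting the unmatched indices as the gaps between consecutive matched values.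
import Mathlib
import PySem

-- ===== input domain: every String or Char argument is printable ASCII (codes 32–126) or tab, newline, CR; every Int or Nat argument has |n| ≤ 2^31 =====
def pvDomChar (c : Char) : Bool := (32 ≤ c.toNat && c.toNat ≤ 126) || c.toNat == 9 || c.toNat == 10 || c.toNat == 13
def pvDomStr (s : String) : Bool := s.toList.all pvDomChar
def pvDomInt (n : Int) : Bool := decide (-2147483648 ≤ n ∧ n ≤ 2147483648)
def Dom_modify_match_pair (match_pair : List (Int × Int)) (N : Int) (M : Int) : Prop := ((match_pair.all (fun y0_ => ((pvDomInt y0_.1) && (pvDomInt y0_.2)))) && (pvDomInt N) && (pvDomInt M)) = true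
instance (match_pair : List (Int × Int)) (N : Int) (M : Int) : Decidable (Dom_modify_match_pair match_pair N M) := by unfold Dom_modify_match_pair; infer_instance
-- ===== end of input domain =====

-- B replaces A's per-index membership scans over range(N)/range(M) by sorting the distinct
-- in-range matched indices and emitting unmatched indices as the gaps between them (alternative
-- algorithm). A mutates match_pair in place (appends); B performs the same mutation (extend);
-- the equivalence proved here is about the RETURN value.

-- ===== PORT A =====
def modify_match_pair (match_pair : List (Int × Int)) (N : Int) (M : Int) : List (Int × Int) :=
  let agent0_list : List Int := match_pair.foldl (fun acc pair => acc ++ [pair.1]) []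
  let agent1_list : List Int := match_pair.foldl (fun acc pair => acc ++ [pair.2]) []
  let mp1 := (PySem.List.pyRange 0 N 1).foldl
    (fun acc i => if !agent0_list.contains i then acc ++ [(i, -1)] else acc) match_pair
  let mp2 := (PySem.List.pyRange 0 M 1).foldl
    (fun acc i => if !agent1_list.contains i then acc ++ [(-1, i)] else acc) mp1
  mp2

-- ===== PORT B =====
-- gaps(values, limit): sort the distinct in-range values, emit ranges between consecutive ones.
def pvGaps (values : List Int) (limit : Int) : List Int :=
  let vs := PySem.List.sorted
    (PySem.Set.ofList (values.filter (fun x => decide (0 ≤ x) && decide (x < limit)))) (fun x => x)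
  let s := vs.foldl
    (fun (st : List Int × Int) v => (st.1 ++ PySem.List.pyRange st.2 v 1, v + 1)) ([], 0)
  s.1 ++ PySem.List.pyRange s.2 limit 1

def modify_match_pair_alt (match_pair : List (Int × Int)) (N : Int) (M : Int) : List (Int × Int) :=
  let unmatched0 := pvGaps (match_pair.map (fun p => p.1)) N
  let unmatched1 := pvGaps (match_pair.map (fun p => p.2)) M
  match_pair ++ unmatched0.map (fun i => (i, -1)) ++ unmatched1.map (fun i => (-1, i))

-- ===== PRECONDITION & SPEC =====
def Spec_modify_match_pair (match_pair : List (Int × Int)) (N : Int) (M : Int) (out : List (Int × Int)) : Prop := out = modify_match_pair_alt match_pair N M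
instance (match_pair : List (Int × Int)) (N : Int) (M : Int) (out : List (Int × Int)) : Decidable (Spec_modify_match_pair match_pair N M out) := by unfold Spec_modify_match_pair; infer_instance

-- ===== CLAIM (what is proved, stated in full; the proofs are below) =====
def Claim_equal_modify_match_pair : Prop := ∀ (match_pair : List (Int × Int)) (N : Int) (M : Int), Dom_modify_match_pair match_pair N M → Spec_modify_match_pair match_pair N M (modify_match_pair match_pair N M)

-- ===== LEMMAS AND PROOFS =====

-- Folding the gap-emission step over a strictly increasing list vs whose elements lie in
-- [cur, limit) produces exactly range(cur, limit) minus vs.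
theorem gaps_fold_eq (vs : List Int) (out : List Int) (cur limit : Int)
    (hp : vs.Pairwise (· < ·)) (hb : ∀ v ∈ vs, cur ≤ v ∧ v < limit) :
    (vs.foldl (fun (st : List Int × Int) v => (st.1 ++ PySem.List.pyRange st.2 v 1, v + 1)) (out, cur)).1
      ++ PySem.List.pyRange
        (vs.foldl (fun (st : List Int × Int) v => (st.1 ++ PySem.List.pyRange st.2 v 1, v + 1)) (out, cur)).2
        limit 1
      = out ++ (PySem.List.pyRange cur limit 1).filter (fun i => !vs.contains i) := by
  induction vs generalizing out cur with
  | nil =>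
    have hall : (fun (i : Int) => !([] : List Int).contains i) = fun _ => true := by
      funext i; rfl
    rw [List.foldl_nil, hall, List.filter_true]
  | cons v rest ih =>
    rw [List.pairwise_cons] at hp
    have hv := hb v (List.mem_cons_self ..)
    rw [List.foldl_cons,
      ih (out ++ PySem.List.pyRange cur v 1) (v + 1) hp.2
        (fun w hw => ⟨by have := hp.1 w hw; omega, (hb w (List.mem_cons_of_mem _ hw)).2⟩)]
    rw [PySem.List.pyRange_one_append cur v limit hv.1 (le_of_lt hv.2),
      PySem.List.pyRange_one_cons hv.2, List.filter_append, List.filter_cons]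
    have h1 : (PySem.List.pyRange cur v 1).filter (fun i => !(i == v || rest.contains i))
        = PySem.List.pyRange cur v 1 := by
      apply List.filter_eq_self.mpr
      intro i hi
      rw [PySem.List.mem_pyRange_one] at hi
      have e1 : (i == v) = false := by simp only [beq_eq_false_iff_ne]; omega
      have e2 : rest.contains i = false := by
        rw [← Bool.not_eq_true, List.contains_eq_mem, decide_eq_true_eq]
        intro hmem; have := hp.1 i hmem; omega
      rw [e1, e2]; rfl
    have h2 : (PySem.List.pyRange (v + 1) limit 1).filter (fun i => !(i == v || rest.contains i))
        = (PySem.List.pyRange (v + 1) limit 1).filter (fun i => !rest.contains i) := by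
      apply List.filter_congr
      intro i hi
      rw [PySem.List.mem_pyRange_one] at hi
      have e1 : (i == v) = false := by simp only [beq_eq_false_iff_ne]; omega
      rw [e1, Bool.false_or]
    simp only [List.contains_cons, BEq.rfl, Bool.true_or, Bool.not_true, Bool.false_eq_true,
      if_false, h1, h2, List.append_assoc]

-- pvGaps values limit is exactly the ascending list of indices in [0, limit) not in values,
-- i.e. what A's per-index membership scan over range(0, limit) keeps.
theorem pvGaps_eq_filter (values : List Int) (limit : Int) :
    pvGaps values limit
      = (PySem.List.pyRange 0 limit 1).filter (fun i => !values.contains i) := by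
  unfold pvGaps
  set vs := PySem.List.sorted
    (PySem.Set.ofList (values.filter (fun x => decide (0 ≤ x) && decide (x < limit)))) (fun x => x)
    with hvs
  have hmem : ∀ x, x ∈ vs ↔ x ∈ values ∧ 0 ≤ x ∧ x < limit := by
    intro x
    rw [hvs, PySem.List.mem_sorted, PySem.Set.mem_ofList, List.mem_filter]
    simp
  rw [gaps_fold_eq vs [] 0 limit (PySem.List.sorted_ofList_pairwise_lt _)
    (fun v hv => by have := (hmem v).1 hv; omega), List.nil_append]
  apply List.filter_congr
  intro i hi
  rw [PySem.List.mem_pyRange_one] at hi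
  have h : (i ∈ vs) = (i ∈ values) := by
    simp only [eq_iff_iff]; rw [hmem]; tauto
  simp only [List.contains_eq_mem, h]

-- ===== VERDICT (by name: the statement is the Claim_ definition above) =====
theorem modify_match_pair_spec : Claim_equal_modify_match_pair := by
  intro mp N M _
  show _ = _
  unfold modify_match_pair modify_match_pair_alt
  simp only [PySem.List.foldl_append_singleton_eq_map, List.nil_append,
    PySem.List.foldl_append_if, pvGaps_eq_filter, List.append_assoc]
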